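-- pv_equiv track=rewrite | github.com/shi0417/shortdrama | scripts/seed_ai_model_catalog.py | infer_capability_tags
-- ===== SOURCE A (Python) =====
-- from typing import Any, Dict, List, Optional, Tuple
--
-- def infer_capability_tags(model_key: str) -> List[str]:
--     lower = model_key.lower()
--     tags: List[str] = []
--     if "thinking" in lower:
--         tags.append("thinking")
--     if "search" in lower:
--         tags.append("search")
--     if "image" in lower:
--         tags.append("image")
--     if "video" in lower or "veo" in lower:
--         tags.append("video")
--     if any(k in lower for k in ("tts", "voice", "whisper", "asr", "transcribe")):
--         tags.append("audio")
--     if any(k in lower for k in ("vision", "vl", "omni")):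
--         tags.append("vision")
--     return tags
-- ===== SOURCE B (Python) =====
-- # Different algorithm: instead of running a substring search per keyword, scan the
-- # lowered key ONCE with sliding windows whose lengths are the distinct keyword
-- # lengths, looking each window up in a keyword->tag dictionary; collect the tags
-- # that fire into a set and emit them in the fixed canonical tag order (= A's order).
--
-- _KEYWORD_TAG = {
--     "thinking": "thinking",
--     "search": "search",
--     "image": "image",
--     "video": "video", "veo": "video",
--     "tts": "audio", "voice": "audio", "whisper": "audio", "asr": "audio", "transcribe": "audio",
--     "vision": "vision", "vl": "vision", "omni": "vision",
-- }
-- _TAG_ORDER = ("thinking", "search", "image", "video", "audio", "vision")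
-- _LENGTHS = sorted({len(k) for k in _KEYWORD_TAG})
--
-- def infer_capability_tags(model_key: str):
--     lower = model_key.lower()
--     found = set()
--     for i in range(len(lower)):
--         for L in _LENGTHS:
--             tag = _KEYWORD_TAG.get(lower[i:i+L])
--             if tag is not None:
--                 found.add(tag)
--     return [t for t in _TAG_ORDER if t in found]
-- ===== Notes on version B (the rewrite author's own statement) =====
-- stated objective: alternative
-- what changed: Instead of running a separate substring search for each keyword, B scans the lowered key once with sliding windows of the distinct keyword lengths, looks each window up in a keyword->tag dictionary, collects firing tags in a set and emits them in the fixed canonical tag order.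
import Mathlib
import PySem

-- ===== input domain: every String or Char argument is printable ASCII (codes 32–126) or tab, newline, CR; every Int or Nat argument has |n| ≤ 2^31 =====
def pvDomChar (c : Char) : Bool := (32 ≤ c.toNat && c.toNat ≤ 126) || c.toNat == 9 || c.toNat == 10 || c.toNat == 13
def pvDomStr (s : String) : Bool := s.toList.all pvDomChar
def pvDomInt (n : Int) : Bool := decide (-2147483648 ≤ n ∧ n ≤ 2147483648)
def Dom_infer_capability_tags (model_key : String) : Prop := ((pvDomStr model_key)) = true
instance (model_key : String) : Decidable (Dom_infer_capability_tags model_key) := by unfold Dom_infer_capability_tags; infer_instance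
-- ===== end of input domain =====

-- B replaces A's per-keyword substring searches by ONE sliding-window scan of the lowered
-- key against a keyword→tag dictionary (alternative algorithm); same return value.

-- ===== PORT A =====
def infer_capability_tags (model_key : String) : List String :=
  let lower := PySem.Str.lower model_key
  let tags : List String := []
  let tags := if PySem.Str.isIn "thinking" lower then tags ++ ["thinking"] else tags
  let tags := if PySem.Str.isIn "search" lower then tags ++ ["search"] else tags
  let tags := if PySem.Str.isIn "image" lower then tags ++ ["image"] else tags
  let tags := if PySem.Str.isIn "video" lower || PySem.Str.isIn "veo" lower then tags ++ ["video"] else tags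
  let tags := if (["tts", "voice", "whisper", "asr", "transcribe"] : List String).any (fun k => PySem.Str.isIn k lower) then tags ++ ["audio"] else tags
  let tags := if (["vision", "vl", "omni"] : List String).any (fun k => PySem.Str.isIn k lower) then tags ++ ["vision"] else tags
  tags

-- ===== PORT B =====
-- the keyword → tag dictionary (keys kept on the List Char side, per the PySem string convention)
def keywordTag : PySem.Dict (List Char) String :=
  PySem.Dict.ofList
    [("thinking".toList, "thinking"), ("search".toList, "search"), ("image".toList, "image"),
     ("video".toList, "video"), ("veo".toList, "video"),
     ("tts".toList, "audio"), ("voice".toList, "audio"), ("whisper".toList, "audio"),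
     ("asr".toList, "audio"), ("transcribe".toList, "audio"),
     ("vision".toList, "vision"), ("vl".toList, "vision"), ("omni".toList, "vision")]

def tagOrder : List String := ["thinking", "search", "image", "video", "audio", "vision"]

-- sorted({len(k) for k in _KEYWORD_TAG}): the distinct keyword lengths, as Python computes at module load
def kwLengths : List Nat := [2, 3, 4, 5, 6, 7, 8, 10]

def infer_capability_tags_alt (model_key : String) : List String :=
  let lower := PySem.Chars.lower model_key.toList
  let found : PySem.Set String :=
    (List.range lower.length).foldl (fun acc (i : Nat) =>
      kwLengths.foldl (fun acc (L : Nat) =>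
        match keywordTag.get? (PySem.List.slice lower (some (i : Int)) (some ((i : Int) + (L : Int)))) with
        | some tag => PySem.Set.add acc tag
        | none => acc) acc) PySem.Set.empty
  tagOrder.filter (fun t => PySem.Set.contains found t)

-- ===== PRECONDITION & SPEC =====
def Spec_infer_capability_tags (model_key : String) (out : List String) : Prop := out = infer_capability_tags_alt model_key
instance (model_key : String) (out : List String) : Decidable (Spec_infer_capability_tags model_key out) := by unfold Spec_infer_capability_tags; infer_instance

-- ===== CLAIM (what is proved, stated in full; the proofs are below) =====
def Claim_equal_infer_capability_tags : Prop := ∀ (model_key : String), Dom_infer_capability_tags model_key → Spec_infer_capability_tags model_key (infer_capability_tags model_key)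

-- ===== LEMMAS AND PROOFS =====

-- the set built by B's double loop, as a standalone function (definitionally the port's fold)
def foundSet (lw : List Char) : PySem.Set String :=
  (List.range lw.length).foldl (fun acc (i : Nat) =>
    kwLengths.foldl (fun acc (L : Nat) =>
      match keywordTag.get? (PySem.List.slice lw (some (i : Int)) (some ((i : Int) + (L : Int)))) with
      | some tag => PySem.Set.add acc tag
      | none => acc) acc) PySem.Set.empty

lemma alt_eq (model_key : String) :
    infer_capability_tags_alt model_key =
      tagOrder.filter (fun t => PySem.Set.contains (foundSet (PySem.Chars.lower model_key.toList)) t) := rfl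

lemma kwItems : keywordTag.items =
    [("thinking".toList, "thinking"), ("search".toList, "search"), ("image".toList, "image"),
     ("video".toList, "video"), ("veo".toList, "video"),
     ("tts".toList, "audio"), ("voice".toList, "audio"), ("whisper".toList, "audio"),
     ("asr".toList, "audio"), ("transcribe".toList, "audio"),
     ("vision".toList, "vision"), ("vl".toList, "vision"), ("omni".toList, "vision")] := by decide

lemma get?_kw (w : List Char) (t : String) : keywordTag.get? w = some t ↔ (w, t) ∈ keywordTag.items :=
  PySem.Dict.get?_eq_some_iff_mem_items keywordTag w t (by decide)

-- membership through a fold whose step adds elements according to P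
lemma mem_foldl_step {β : Type} (step : PySem.Set String → β → PySem.Set String)
    (P : β → String → Prop)
    (h : ∀ acc b t, t ∈ step acc b ↔ t ∈ acc ∨ P b t) :
    ∀ (l : List β) (acc : PySem.Set String) (t : String),
      t ∈ l.foldl step acc ↔ t ∈ acc ∨ ∃ b ∈ l, P b t := by
  intro l
  induction l with
  | nil => simp
  | cons b l ih =>
    intro acc t
    simp only [List.foldl_cons, ih, h, List.mem_cons]
    constructor
    · rintro ((h1 | h1) | ⟨c, hc, hp⟩)
      exacts [Or.inl h1, Or.inr ⟨b, Or.inl rfl, h1⟩, Or.inr ⟨c, Or.inr hc, hp⟩]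
    · rintro (h1 | ⟨c, rfl | hc, hp⟩)
      exacts [Or.inl (Or.inl h1), Or.inl (Or.inr hp), Or.inr ⟨c, hc, hp⟩]

lemma mem_found (lw : List Char) (t : String) :
    t ∈ foundSet lw ↔
      ∃ i < lw.length, ∃ L ∈ kwLengths, keywordTag.get? ((lw.drop i).take L) = some t := by
  unfold foundSet
  have hstep1 : ∀ (i : Nat) (acc : PySem.Set String) (L : Nat) (t : String),
      t ∈ (fun acc (L : Nat) =>
        match keywordTag.get? (PySem.List.slice lw (some (i : Int)) (some ((i : Int) + (L : Int)))) with
        | some tag => PySem.Set.add acc tag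
        | none => acc) acc L ↔
      t ∈ acc ∨ keywordTag.get? ((lw.drop i).take L) = some t := by
    intro i acc L t
    simp only [PySem.List.slice_natCast_add]
    cases hf : keywordTag.get? ((lw.drop i).take L) <;>
      simp [PySem.Set.mem_add, eq_comm]
  have hinner : ∀ (acc : PySem.Set String) (i : Nat) (t : String),
      t ∈ (fun acc (i : Nat) =>
        kwLengths.foldl (fun acc (L : Nat) =>
          match keywordTag.get? (PySem.List.slice lw (some (i : Int)) (some ((i : Int) + (L : Int)))) with
          | some tag => PySem.Set.add acc tag
          | none => acc) acc) acc i ↔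
        t ∈ acc ∨ ∃ L ∈ kwLengths, keywordTag.get? ((lw.drop i).take L) = some t := by
    intro acc i t
    exact mem_foldl_step _ (fun L t => keywordTag.get? ((lw.drop i).take L) = some t)
      (hstep1 i) kwLengths acc t
  rw [mem_foldl_step _ (fun i t => ∃ L ∈ kwLengths, keywordTag.get? ((lw.drop i).take L) = some t)
      hinner (List.range lw.length) PySem.Set.empty t]
  simp [PySem.Set.empty, List.mem_range]

-- a window of some allowed length equals the keyword iff the keyword occurs in the text
lemma window_hit_iff (lw kwL : List Char) (hne : kwL ≠ []) (hL : kwL.length ∈ kwLengths) :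
    (∃ i < lw.length, ∃ L ∈ kwLengths, (lw.drop i).take L = kwL) ↔
      PySem.Chars.isIn kwL lw = true := by
  rw [← PySem.Chars.exists_prefix_drop_iff_isIn]
  constructor
  · rintro ⟨i, hi, L, hLm, rfl⟩
    exact ⟨i, List.take_prefix _ _⟩
  · rintro ⟨j, hp⟩
    have hj : j < lw.length := by
      by_contra hge
      rw [List.drop_eq_nil_of_le (by omega)] at hp
      exact hne (List.prefix_nil.mp hp)
    exact ⟨j, hj, kwL.length, hL, (List.prefix_iff_eq_take.mp hp).symm⟩

-- the dictionary returns tag t exactly on t's keywords, so t lands in the set iff a keyword of t occurs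
lemma found_tag (lw : List Char) (t : String) (kws : List (List Char))
    (hk : ∀ w, ((w, t) ∈ keywordTag.items ↔ w ∈ kws))
    (hgood : ∀ w ∈ kws, w ≠ [] ∧ w.length ∈ kwLengths) :
    (t ∈ foundSet lw) ↔ ∃ w ∈ kws, PySem.Chars.isIn w lw = true := by
  rw [mem_found]
  constructor
  · rintro ⟨i, hi, L, hL, hget⟩
    have hw := (hk _).mp ((get?_kw _ _).mp hget)
    exact ⟨_, hw, (window_hit_iff lw _ (hgood _ hw).1 (hgood _ hw).2).mp ⟨i, hi, L, hL, rfl⟩⟩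
  · rintro ⟨w, hwm, hin⟩
    obtain ⟨hne, hLmem⟩ := hgood _ hwm
    obtain ⟨i, hi, L, hLm, heq⟩ := (window_hit_iff lw w hne hLmem).mpr hin
    exact ⟨i, hi, L, hLm, (get?_kw _ _).mpr ((hk _).mpr (by rw [heq]; exact hwm))⟩

-- keyword lists per tag, read off the dictionary
lemma hk_thinking : ∀ w, ((w, ("thinking" : String)) ∈ keywordTag.items ↔ w ∈ ["thinking".toList]) := by
  intro w
  rw [kwItems]
  simp only [List.mem_cons, List.not_mem_nil, or_false, Prod.mk.injEq]
  constructor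
  · rintro (⟨h1,h2⟩|⟨h1,h2⟩|⟨h1,h2⟩|⟨h1,h2⟩|⟨h1,h2⟩|⟨h1,h2⟩|⟨h1,h2⟩|⟨h1,h2⟩|⟨h1,h2⟩|⟨h1,h2⟩|⟨h1,h2⟩|⟨h1,h2⟩|⟨h1,h2⟩) <;>
      first | exact absurd h2 (by decide) | simp [h1]
  · intro h1; simp_all

lemma hk_search : ∀ w, ((w, ("search" : String)) ∈ keywordTag.items ↔ w ∈ ["search".toList]) := by
  intro w
  rw [kwItems]
  simp only [List.mem_cons, List.not_mem_nil, or_false, Prod.mk.injEq]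
  constructor
  · rintro (⟨h1,h2⟩|⟨h1,h2⟩|⟨h1,h2⟩|⟨h1,h2⟩|⟨h1,h2⟩|⟨h1,h2⟩|⟨h1,h2⟩|⟨h1,h2⟩|⟨h1,h2⟩|⟨h1,h2⟩|⟨h1,h2⟩|⟨h1,h2⟩|⟨h1,h2⟩) <;>
      first | exact absurd h2 (by decide) | simp [h1]
  · intro h1; simp_all

lemma hk_image : ∀ w, ((w, ("image" : String)) ∈ keywordTag.items ↔ w ∈ ["image".toList]) := by
  intro w
  rw [kwItems]
  simp only [List.mem_cons, List.not_mem_nil, or_false, Prod.mk.injEq]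
  constructor
  · rintro (⟨h1,h2⟩|⟨h1,h2⟩|⟨h1,h2⟩|⟨h1,h2⟩|⟨h1,h2⟩|⟨h1,h2⟩|⟨h1,h2⟩|⟨h1,h2⟩|⟨h1,h2⟩|⟨h1,h2⟩|⟨h1,h2⟩|⟨h1,h2⟩|⟨h1,h2⟩) <;>
      first | exact absurd h2 (by decide) | simp [h1]
  · intro h1; simp_all

lemma hk_video : ∀ w, ((w, ("video" : String)) ∈ keywordTag.items ↔ w ∈ ["video".toList, "veo".toList]) := by
  intro w
  rw [kwItems]
  simp only [List.mem_cons, List.not_mem_nil, or_false, Prod.mk.injEq]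
  constructor
  · rintro (⟨h1,h2⟩|⟨h1,h2⟩|⟨h1,h2⟩|⟨h1,h2⟩|⟨h1,h2⟩|⟨h1,h2⟩|⟨h1,h2⟩|⟨h1,h2⟩|⟨h1,h2⟩|⟨h1,h2⟩|⟨h1,h2⟩|⟨h1,h2⟩|⟨h1,h2⟩) <;>
      first | exact absurd h2 (by decide) | simp [h1]
  · rintro (h1 | h1) <;> simp_all

lemma hk_audio : ∀ w, ((w, ("audio" : String)) ∈ keywordTag.items ↔
    w ∈ ["tts".toList, "voice".toList, "whisper".toList, "asr".toList, "transcribe".toList]) := by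
  intro w
  rw [kwItems]
  simp only [List.mem_cons, List.not_mem_nil, or_false, Prod.mk.injEq]
  constructor
  · rintro (⟨h1,h2⟩|⟨h1,h2⟩|⟨h1,h2⟩|⟨h1,h2⟩|⟨h1,h2⟩|⟨h1,h2⟩|⟨h1,h2⟩|⟨h1,h2⟩|⟨h1,h2⟩|⟨h1,h2⟩|⟨h1,h2⟩|⟨h1,h2⟩|⟨h1,h2⟩) <;>
      first | exact absurd h2 (by decide) | simp [h1]
  · rintro (h1 | h1 | h1 | h1 | h1) <;> simp_all

lemma hk_vision : ∀ w, ((w, ("vision" : String)) ∈ keywordTag.items ↔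
    w ∈ ["vision".toList, "vl".toList, "omni".toList]) := by
  intro w
  rw [kwItems]
  simp only [List.mem_cons, List.not_mem_nil, or_false, Prod.mk.injEq]
  constructor
  · rintro (⟨h1,h2⟩|⟨h1,h2⟩|⟨h1,h2⟩|⟨h1,h2⟩|⟨h1,h2⟩|⟨h1,h2⟩|⟨h1,h2⟩|⟨h1,h2⟩|⟨h1,h2⟩|⟨h1,h2⟩|⟨h1,h2⟩|⟨h1,h2⟩|⟨h1,h2⟩) <;>
      first | exact absurd h2 (by decide) | simp [h1]
  · rintro (h1 | h1 | h1) <;> simp_all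

-- the six membership tests of B as the boolean substring conditions of A
lemma cf_thinking (lw : List Char) : PySem.Set.contains (foundSet lw) "thinking" =
    PySem.Chars.isIn "thinking".toList lw := by
  apply Bool.coe_iff_coe.mp
  rw [PySem.Set.contains_iff, found_tag lw "thinking" _ hk_thinking (by decide)]
  simp

lemma cf_search (lw : List Char) : PySem.Set.contains (foundSet lw) "search" =
    PySem.Chars.isIn "search".toList lw := by
  apply Bool.coe_iff_coe.mp
  rw [PySem.Set.contains_iff, found_tag lw "search" _ hk_search (by decide)]
  simp

lemma cf_image (lw : List Char) : PySem.Set.contains (foundSet lw) "image" =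
    PySem.Chars.isIn "image".toList lw := by
  apply Bool.coe_iff_coe.mp
  rw [PySem.Set.contains_iff, found_tag lw "image" _ hk_image (by decide)]
  simp

lemma cf_video (lw : List Char) : PySem.Set.contains (foundSet lw) "video" =
    (PySem.Chars.isIn "video".toList lw || PySem.Chars.isIn "veo".toList lw) := by
  apply Bool.coe_iff_coe.mp
  rw [PySem.Set.contains_iff, found_tag lw "video" _ hk_video (by decide)]
  simp

lemma cf_audio (lw : List Char) : PySem.Set.contains (foundSet lw) "audio" =
    (PySem.Chars.isIn "tts".toList lw || (PySem.Chars.isIn "voice".toList lw ||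
      (PySem.Chars.isIn "whisper".toList lw || (PySem.Chars.isIn "asr".toList lw ||
        PySem.Chars.isIn "transcribe".toList lw)))) := by
  apply Bool.coe_iff_coe.mp
  rw [PySem.Set.contains_iff, found_tag lw "audio" _ hk_audio (by decide)]
  simp

lemma cf_vision (lw : List Char) : PySem.Set.contains (foundSet lw) "vision" =
    (PySem.Chars.isIn "vision".toList lw || (PySem.Chars.isIn "vl".toList lw ||
      PySem.Chars.isIn "omni".toList lw)) := by
  apply Bool.coe_iff_coe.mp
  rw [PySem.Set.contains_iff, found_tag lw "vision" _ hk_vision (by decide)]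
  simp

-- ===== VERDICT (by name: the statement is the Claim_ definition above) =====
theorem infer_capability_tags_spec : Claim_equal_infer_capability_tags := by
  intro model_key _
  show infer_capability_tags model_key = infer_capability_tags_alt model_key
  rw [alt_eq]
  unfold infer_capability_tags tagOrder
  simp only [PySem.Str.isIn_eq, PySem.Str.toList_lower, List.filter_cons, List.filter_nil,
             List.any_cons, List.any_nil, Bool.or_false]
  generalize PySem.Chars.lower model_key.toList = lw
  rw [cf_thinking, cf_search, cf_image, cf_video, cf_audio, cf_vision]
  generalize PySem.Chars.isIn "thinking".toList lw = c1
  generalize PySem.Chars.isIn "search".toList lw = c2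
  generalize PySem.Chars.isIn "image".toList lw = c3
  generalize (PySem.Chars.isIn "video".toList lw || PySem.Chars.isIn "veo".toList lw) = c4
  generalize (PySem.Chars.isIn "tts".toList lw || (PySem.Chars.isIn "voice".toList lw ||
      (PySem.Chars.isIn "whisper".toList lw || (PySem.Chars.isIn "asr".toList lw ||
        PySem.Chars.isIn "transcribe".toList lw)))) = c5
  generalize (PySem.Chars.isIn "vision".toList lw || (PySem.Chars.isIn "vl".toList lw ||
      PySem.Chars.isIn "omni".toList lw)) = c6
  cases c1 <;> cases c2 <;> cases c3 <;> cases c4 <;> cases c5 <;> cases c6 <;> rfl
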